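-- pv_equiv track=rewrite | github.com/GitContainer/alarm-limit | open_and_load_files.py | organize_the_file_names_in_cat
-- ===== SOURCE A (Python) =====
-- def organize_the_file_names_in_cat(fnames):
--     cat_dict = {}
--     for fname in fnames:
--         cat = fname.split()[1]
--         try:
--             cat_dict[cat].append(fname)
--         except:
--             cat_dict[cat] = []
--             cat_dict[cat].append(fname)
--     return cat_dict
-- ===== SOURCE B (Python) =====
-- def organize_the_file_names_in_cat(fnames):
--     cats = list(dict.fromkeys(f.split()[1] for f in fnames))
--     return {cat: [f for f in fnames if f.split()[1] == cat] for cat in cats}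
-- ===== Notes on version B (the rewrite author's own statement) =====
-- stated objective: alternative
-- what changed: Replaces the single-pass try/except dict accumulation with a two-phase comprehension: first the ordered distinct categories via dict.fromkeys, then one filtering pass over fnames per category.
import Mathlib
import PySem

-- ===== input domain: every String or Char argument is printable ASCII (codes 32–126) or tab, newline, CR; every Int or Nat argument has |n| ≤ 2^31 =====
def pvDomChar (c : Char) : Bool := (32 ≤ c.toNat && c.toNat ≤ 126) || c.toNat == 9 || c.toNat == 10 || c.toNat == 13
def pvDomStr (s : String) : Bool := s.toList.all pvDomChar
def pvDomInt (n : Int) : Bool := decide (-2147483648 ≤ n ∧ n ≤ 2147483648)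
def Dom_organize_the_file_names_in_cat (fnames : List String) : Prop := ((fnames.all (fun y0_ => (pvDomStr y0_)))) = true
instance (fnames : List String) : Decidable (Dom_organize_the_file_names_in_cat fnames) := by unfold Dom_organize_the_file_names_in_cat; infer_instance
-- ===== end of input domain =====

-- B replaces A's single-pass try/except dict accumulation by a two-phase comprehension
-- (ordered distinct categories, then one filter per category); alternative structure, not faster.

-- ===== PORT A =====
-- fname.split()[1] (none = IndexError, excluded by Pre_)
def pvCatOf (f : String) : Option String := PySem.List.pyGet? (PySem.Str.split₀ f) 1

def organize_the_file_names_in_cat (fnames : List String) : List (String × List String) :=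
  (fnames.foldl
    (fun d fname =>
      match pvCatOf fname with
      | none => d            -- IndexError (outside Pre_)
      -- try: cat_dict[cat].append(fname); except: cat_dict[cat] = []; append  ==  d[cat] = d.get(cat, []) + [fname]
      | some cat => d.modify cat [] (· ++ [fname]))
    PySem.Dict.empty).items

-- ===== PORT B =====
def organize_the_file_names_in_cat_alt (fnames : List String) : List (String × List String) :=
  -- cats = list(dict.fromkeys(f.split()[1] for f in fnames))
  let cats := PySem.List.dedup (fnames.filterMap pvCatOf)
  -- {cat: [f for f in fnames if f.split()[1] == cat] for cat in cats}
  cats.map (fun cat => (cat, fnames.filter (fun f => pvCatOf f == some cat)))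

-- ===== PRECONDITION & SPEC =====
-- Pre_ excludes exactly the inputs where some name has fewer than two whitespace-separated
-- tokens: there fname.split()[1] raises IndexError in both A and B.
def Pre_organize_the_file_names_in_cat (fnames : List String) : Prop :=
  ∀ f ∈ fnames, 2 ≤ (PySem.Str.split₀ f).length
instance (fnames : List String) : Decidable (Pre_organize_the_file_names_in_cat fnames) := by unfold Pre_organize_the_file_names_in_cat; infer_instance
def pvWitness_organize_the_file_names_in_cat : List String :=
  ["f1 catA", "f2 catB", "f3 catA"]
def Spec_organize_the_file_names_in_cat (fnames : List String) (out : List (String × List String)) : Prop := out = organize_the_file_names_in_cat_alt fnames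
instance (fnames : List String) (out : List (String × List String)) : Decidable (Spec_organize_the_file_names_in_cat fnames out) := by unfold Spec_organize_the_file_names_in_cat; infer_instance

-- ===== CLAIM (what is proved, stated in full; the proofs are below) =====
def Claim_equal_organize_the_file_names_in_cat : Prop := ∀ (fnames : List String), Dom_organize_the_file_names_in_cat fnames → Pre_organize_the_file_names_in_cat fnames → Spec_organize_the_file_names_in_cat fnames (organize_the_file_names_in_cat fnames)

-- ===== LEMMAS AND PROOFS =====

-- under Pre_, the category of f is a value
def pvKey (f : String) : String := ((PySem.Str.split₀ f).getD 1 "")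

theorem pvCatOf_eq_some (f : String) (h : 2 ≤ (PySem.Str.split₀ f).length) :
    pvCatOf f = some (pvKey f) := by
  unfold pvCatOf pvKey
  have h1 : (1 : Nat) < (PySem.Str.split₀ f).length := by omega
  have := PySem.List.pyGet?_natCast (PySem.Str.split₀ f) 1
  simp only [Nat.cast_one] at this
  rw [this, List.getElem?_eq_getElem h1, List.getD, List.getElem?_eq_getElem h1]
  simp

theorem pvMap_eq (fnames : List String) (hp : ∀ f ∈ fnames, 2 ≤ (PySem.Str.split₀ f).length) :
    fnames.map pvKey = fnames.filterMap pvCatOf := by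
  induction fnames with
  | nil => rfl
  | cons x xs ih =>
    have hx := pvCatOf_eq_some x (hp x (by simp))
    simp only [List.map_cons, List.filterMap_cons, hx]
    exact congrArg _ (ih (fun f hf => hp f (by simp [hf])))

theorem pvMain (fnames : List String) (hp : ∀ f ∈ fnames, 2 ≤ (PySem.Str.split₀ f).length) :
    organize_the_file_names_in_cat fnames = organize_the_file_names_in_cat_alt fnames := by
  unfold organize_the_file_names_in_cat organize_the_file_names_in_cat_alt
  -- replace the Option match by a direct modify keyed by pvKey
  have hstep : fnames.foldl
      (fun d fname =>
        match pvCatOf fname with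
        | none => d
        | some cat => d.modify cat [] (· ++ [fname]))
      PySem.Dict.empty
      = fnames.foldl (fun d f => d.modify (pvKey f) [] (· ++ [f])) PySem.Dict.empty := by
    apply PySem.List.foldl_congr_mem
    intro d f hf
    rw [pvCatOf_eq_some f (hp f hf)]
  rw [hstep]
  have hnd : (fnames.foldl (fun d f => d.modify (pvKey f) [] (· ++ [f])) PySem.Dict.empty).keys.Nodup := by
    exact PySem.Dict.nodup_keys_foldl_modify_key fnames pvKey [] (fun d f => (· ++ [f])) PySem.Dict.empty (by simp)
  rw [PySem.Dict.items_eq_map_keys _ hnd ([] : List String)]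
  have hkeys : (fnames.foldl (fun d f => d.modify (pvKey f) [] (· ++ [f])) PySem.Dict.empty).keys
      = PySem.List.dedup (fnames.filterMap pvCatOf) := by
    rw [PySem.Dict.keys_foldl_modify_key]
    rw [pvMap_eq fnames hp]
    show PySem.Set.update [] (List.filterMap pvCatOf fnames) = _
    rw [PySem.Set.update_nil_left]
    simp
  rw [hkeys]
  apply List.map_congr_left
  intro c _
  refine congrArg _ ?_
  -- getD of the modify-loop = the filtered group
  have hfold : fnames.foldl (fun d f => d.modify (pvKey f) [] (· ++ [f])) PySem.Dict.empty
      = (fnames.map (fun f => (pvKey f, f))).foldl (fun d p => d.modify p.1 [] (· ++ [p.2])) PySem.Dict.empty := by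
    rw [List.foldl_map]
  rw [hfold, PySem.Dict.getD_foldl_modify_append]
  simp only [PySem.Dict.getD_empty, List.nil_append, List.filter_map, List.map_map]
  rw [show ((fun p => p.1 == c) ∘ fun f => (pvKey f, f)) = fun f => pvKey f == c from rfl,
      show ((fun p => p.2) ∘ fun f => (pvKey f, f)) = id from rfl, List.map_id]
  apply List.filter_congr
  intro f hf
  rw [pvCatOf_eq_some f (hp f hf)]
  simp

-- ===== VERDICT (by name: the statement is the Claim_ definition above) =====
theorem organize_the_file_names_in_cat_spec : Claim_equal_organize_the_file_names_in_cat := by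
  intro fnames _ hpre
  unfold Spec_organize_the_file_names_in_cat
  exact pvMain fnames hpre
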